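-- pv_equiv track=rewrite | github.com/yuxin101/skills | skills/volcengine-skills/byted-las-video-inpaint/scripts/skill.py | _flatten_targets
-- ===== SOURCE A (Python) =====
-- from typing import Any, Dict, List, Optional, Tuple
--
-- def _flatten_targets(values: Optional[List[str]]) -> Optional[List[str]]:
--     if not values:
--         return None
--     out: List[str] = []
--     for v in values:
--         parts = [p for p in str(v).replace(",", " ").split(" ") if p]
--         out.extend(parts)
--     return out or None
-- ===== SOURCE B (Python) =====
-- from typing import List, Optional
--
-- def _flatten_targets(values: Optional[List[str]]) -> Optional[List[str]]:
--     # Single character-level scan: build each token with an explicit buffer,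
--     # flushing on ',' or ' ' (the only delimiters A's replace+split recognises).
--     if not values:
--         return None
--     out: List[str] = []
--     cur: List[str] = []
--     for v in values:
--         for ch in str(v):
--             if ch == "," or ch == " ":
--                 if cur:
--                     out.append("".join(cur))
--                     cur = []
--             else:
--                 cur.append(ch)
--         if cur:
--             out.append("".join(cur))
--             cur = []
--     return out or None
-- ===== Notes on version B (the rewrite author's own statement) =====
-- stated objective: alternative
-- what changed: B is a single character-level scanner with an explicit token buffer flushed on ',' or ' ', instead of A's staged replace-then-split-then-filter string transformations per element.
import Mathlib
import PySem

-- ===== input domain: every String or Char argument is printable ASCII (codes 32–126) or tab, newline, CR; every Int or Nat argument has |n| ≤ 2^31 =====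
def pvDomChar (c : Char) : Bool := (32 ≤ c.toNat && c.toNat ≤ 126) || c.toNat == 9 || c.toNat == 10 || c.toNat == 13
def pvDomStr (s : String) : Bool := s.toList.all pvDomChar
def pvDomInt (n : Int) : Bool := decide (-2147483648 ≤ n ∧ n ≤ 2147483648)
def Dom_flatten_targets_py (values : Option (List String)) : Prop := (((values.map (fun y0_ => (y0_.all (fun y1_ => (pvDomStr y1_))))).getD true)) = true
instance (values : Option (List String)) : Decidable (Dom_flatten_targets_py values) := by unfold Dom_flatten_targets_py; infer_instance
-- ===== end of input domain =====

-- B replaces A's staged replace/split/filter string transformations by a single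
-- character-level scanner with an explicit token buffer (objective: alternative, same cost).

-- ===== PORT A =====
-- ' ' is a nonempty separator, so Str.split? always returns some; .getD [] is exact here
def flatten_targets_py (values : Option (List String)) : Option (List String) :=
  match values with
  | none => none
  | some vs =>
    if vs.isEmpty then none
    else
      let out := vs.foldl (fun out v =>
        out ++ (((PySem.Str.split? (PySem.Str.replace v "," " ") " ").getD []).filter
                  (fun p => p != ""))) []
      if out.isEmpty then none else some out

-- ===== PORT B =====
-- one scanner step: flush the buffer on ',' or ' ', otherwise extend it
def scanStep (st : List String × List Char) (c : Char) : List String × List Char :=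
  if c = ',' || c = ' ' then
    if st.2.isEmpty then st else (st.1 ++ [String.ofList st.2], [])
  else (st.1, st.2 ++ [c])

def flatten_targets_py_alt (values : Option (List String)) : Option (List String) :=
  match values with
  | none => none
  | some vs =>
    if vs.isEmpty then none
    else
      let out := vs.foldl (fun out v =>
        let st := v.toList.foldl scanStep (out, [])
        if st.2.isEmpty then st.1 else st.1 ++ [String.ofList st.2]) []
      if out.isEmpty then none else some out

-- ===== PRECONDITION & SPEC =====
def Spec_flatten_targets_py (values : Option (List String)) (out : Option (List String)) : Prop := out = flatten_targets_py_alt values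
instance (values : Option (List String)) (out : Option (List String)) : Decidable (Spec_flatten_targets_py values out) := by unfold Spec_flatten_targets_py; infer_instance

-- ===== CLAIM (what is proved, stated in full; the proofs are below) =====
def Claim_equal_flatten_targets_py : Prop := ∀ (values : Option (List String)), Dom_flatten_targets_py values → Spec_flatten_targets_py values (flatten_targets_py values)

-- ===== LEMMAS AND PROOFS =====

/-- `replace "," " "` as a character map. -/
def rcCh (c : Char) : Char := if c = ',' then ' ' else c

/-- Splitting on a single space, recursively. -/
def splitSp : List Char → List (List Char)
  | [] => [[]]
  | c :: t => if c = ' ' then [] :: splitSp t else (splitSp t).modifyHead (c :: ·)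

theorem splitSp_ne_nil (cs : List Char) : splitSp cs ≠ [] := by
  induction cs with
  | nil => simp [splitSp]
  | cons c t ih =>
    simp only [splitSp]
    split_ifs
    · simp
    · cases hsp : splitSp t with
      | nil => exact absurd hsp ih
      | cons x xs => simp

theorem replace_go_eq (l : List Char) : ∀ (fuel : ℕ) (acc : List Char), l.length ≤ fuel →
    PySem.Chars.replace.go [','] [' '] fuel l acc = acc.reverse ++ l.map rcCh := by
  induction l with
  | nil =>
    intro fuel acc _
    cases fuel <;> simp [PySem.Chars.replace.go]
  | cons c t ih =>
    intro fuel acc h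
    cases fuel with
    | zero => simp at h
    | succ n =>
      simp only [PySem.Chars.replace.go]
      by_cases hc : c = ','
      · subst hc
        rw [if_pos (by simp [List.isPrefixOf])]
        simp only [List.length_cons] at h
        rw [show List.drop (List.length [',']) (',' :: t) = t by simp]
        rw [ih n _ (by omega)]
        simp [rcCh]
      · rw [if_neg (by simp [List.isPrefixOf]; intro h'; exact hc h'.symm)]
        simp only [List.length_cons] at h
        rw [ih n _ (by omega)]
        simp [rcCh, hc]

theorem replace_eq_map (cs : List Char) :
    PySem.Chars.replace cs [','] [' '] = cs.map rcCh := by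
  rw [show PySem.Chars.replace cs [','] [' ']
        = PySem.Chars.replace.go [','] [' '] cs.length cs [] by
      simp [PySem.Chars.replace]]
  exact replace_go_eq cs cs.length [] (le_refl _)

theorem splitOn_go_eq (l : List Char) : ∀ (fuel : ℕ) (cur : List Char) (acc : List (List Char)),
    l.length ≤ fuel →
    PySem.Chars.splitOn.go [' '] fuel l cur acc
      = acc.reverse ++ (splitSp l).modifyHead (cur.reverse ++ ·) := by
  induction l with
  | nil =>
    intro fuel cur acc _
    cases fuel <;> simp [PySem.Chars.splitOn.go, splitSp]
  | cons c t ih =>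
    intro fuel cur acc h
    cases fuel with
    | zero => simp at h
    | succ n =>
      simp only [PySem.Chars.splitOn.go]
      by_cases hc : c = ' '
      · subst hc
        rw [if_pos (by simp [List.isPrefixOf])]
        simp only [List.length_cons] at h
        rw [show List.drop (List.length [' ']) (' ' :: t) = t by simp]
        rw [ih n [] _ (by omega)]
        simp only [splitSp, if_true]
        cases hsp : splitSp t with
        | nil => exact absurd hsp (splitSp_ne_nil t)
        | cons x xs => simp
      · rw [if_neg (by simp [List.isPrefixOf]; intro h'; exact hc h'.symm)]
        simp only [List.length_cons] at h
        rw [ih n (c :: cur) acc (by omega)]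
        simp only [splitSp, if_neg hc]
        cases hsp : splitSp t with
        | nil => exact absurd hsp (splitSp_ne_nil t)
        | cons x xs => simp

theorem splitOn_eq_splitSp (cs : List Char) :
    PySem.Chars.splitOn cs [' '] = splitSp cs := by
  have := splitOn_go_eq cs (cs.length + 1) [] [] (by omega)
  simp only [PySem.Chars.splitOn, this, List.reverse_nil, List.nil_append]
  cases hsp : splitSp cs with
  | nil => exact absurd hsp (splitSp_ne_nil cs)
  | cons x xs => simp

/-- Character-level tokens of a string: replace commas by spaces, split on spaces, drop empties. -/
def tokC (cs : List Char) : List (List Char) :=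
  (splitSp (cs.map rcCh)).filter (fun p => !p.isEmpty)

/-- The per-string token computation of port A, at String level. -/
def tokS (v : String) : List String :=
  ((PySem.Str.split? (PySem.Str.replace v "," " ") " ").getD []).filter (fun p => p != "")

theorem ofList_beq_empty (cs : List Char) : (String.ofList cs == "") = cs.isEmpty := by
  cases h : (String.ofList cs == "") with
  | true =>
    have : String.ofList cs = "" := eq_of_beq h
    have : cs = [] := by
      have h2 := congrArg String.toList this
      simpa using h2
    simp [this]
  | false =>
    cases cs with
    | nil => simp at h
    | cons c t => simp

theorem tokS_eq (v : String) : tokS v = (tokC v.toList).map String.ofList := by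
  have hrep : (PySem.Str.replace v "," " ").toList
      = v.toList.map rcCh := by
    rw [PySem.Str.toList_replace]
    rw [show (",".toList) = [','] from rfl, show (" ".toList) = [' '] from rfl]
    exact replace_eq_map _
  simp only [tokS, PySem.Str.split?, PySem.Chars.split?, hrep]
  rw [show (" ".toList) = [' '] from rfl]
  rw [if_neg (by simp)]
  simp only [Option.map_some, Option.getD_some, splitOn_eq_splitSp, tokC]
  rw [List.filter_map]
  congr 1
  apply List.filter_congr
  intro p _
  simp [Function.comp, ofList_beq_empty, bne]

theorem foldl_tokS (vs : List String) (init : List String) :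
    vs.foldl (fun out v => out ++ tokS v) init = init ++ vs.flatMap tokS := by
  induction vs generalizing init with
  | nil => simp
  | cons v vs ih => simp [List.foldl_cons, ih]

/-- Recursive specification of B's scanner on one string: the tokens emitted
    from a pending buffer `cur` followed by the characters `cs`. -/
def toks (cur : List Char) : List Char → List String
  | [] => if cur.isEmpty then [] else [String.ofList cur]
  | c :: t =>
    if c = ',' || c = ' ' then
      (if cur.isEmpty then [] else [String.ofList cur]) ++ toks [] t
    else toks (cur ++ [c]) t

theorem scan_foldl_spec (cs : List Char) : ∀ (out : List String) (cur : List Char),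
    (if (cs.foldl scanStep (out, cur)).2.isEmpty then (cs.foldl scanStep (out, cur)).1
     else (cs.foldl scanStep (out, cur)).1 ++ [String.ofList (cs.foldl scanStep (out, cur)).2])
    = out ++ toks cur cs := by
  induction cs with
  | nil =>
    intro out cur
    simp only [List.foldl_nil, toks]
    split_ifs <;> simp
  | cons c t ih =>
    intro out cur
    simp only [List.foldl_cons, scanStep, toks]
    by_cases hc : (c = ',' || c = ' ') = true
    · simp only [hc, if_true]
      by_cases hcur : cur.isEmpty
      · simp only [hcur, if_true]
        rw [ih out cur]
        simp only [List.isEmpty_iff] at hcur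
        simp [hcur]
      · simp only [hcur, Bool.false_eq_true, if_false]
        rw [ih (out ++ [String.ofList cur]) []]
        simp
    · simp only [hc, Bool.false_eq_true, if_false]
      exact ih out (cur ++ [c])

theorem toks_eq_tokC (cs : List Char) : ∀ (cur : List Char),
    toks cur cs
      = (((splitSp (cs.map rcCh)).modifyHead (cur ++ ·)).filter (fun p => !p.isEmpty)).map
          String.ofList := by
  induction cs with
  | nil =>
    intro cur
    simp only [toks, List.map_nil, splitSp, List.modifyHead]
    by_cases hcur : cur.isEmpty
    · simp only [List.isEmpty_iff] at hcur; simp [hcur]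
    · simp only [List.isEmpty_iff] at hcur; simp [hcur]
  | cons c t ih =>
    intro cur
    have hsp := splitSp_ne_nil (t.map rcCh)
    by_cases hc : (c = ',' || c = ' ') = true
    · have hr : rcCh c = ' ' := by
        simp only [Bool.or_eq_true, decide_eq_true_eq] at hc
        rcases hc with h | h <;> simp [rcCh, h]
      simp only [toks, hc, if_true, List.map_cons, hr, splitSp, if_true, List.modifyHead,
        List.filter_cons]
      rw [ih []]
      by_cases hcur : cur.isEmpty
      · simp only [List.isEmpty_iff] at hcur
        subst hcur
        cases hx : splitSp (t.map rcCh) with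
        | nil => exact absurd hx hsp
        | cons x xs => simp
      · simp only [List.isEmpty_iff] at hcur
        cases hx : splitSp (t.map rcCh) with
        | nil => exact absurd hx hsp
        | cons x xs => simp [hcur]
    · have hc' : ¬ c = ',' ∧ ¬ c = ' ' := by
        simp only [Bool.or_eq_true, decide_eq_true_eq] at hc
        tauto
      have hr : rcCh c = c := by simp [rcCh, hc'.1]
      simp only [toks, hc, Bool.false_eq_true, if_false, List.map_cons, hr, splitSp, if_neg hc'.2]
      rw [ih (cur ++ [c])]
      cases hx : splitSp (t.map rcCh) with
      | nil => exact absurd hx hsp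
      | cons x xs => simp [List.modifyHead]

theorem toks_nil_eq_tokS (v : String) : toks [] v.toList = tokS v := by
  rw [tokS_eq, toks_eq_tokC]
  congr 1
  cases hx : splitSp (v.toList.map rcCh) with
  | nil => exact absurd hx (splitSp_ne_nil _)
  | cons x xs => simp [tokC, hx, List.modifyHead]

-- ===== VERDICT (by name: the statement is the Claim_ definition above) =====
theorem flatten_targets_py_spec : Claim_equal_flatten_targets_py := by
  intro values _
  unfold Spec_flatten_targets_py flatten_targets_py flatten_targets_py_alt
  cases values with
  | none => rfl
  | some vs =>
    by_cases h : vs.isEmpty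
    · simp [h]
    · simp only [h, Bool.false_eq_true, if_false]
      have hstep : (fun out v =>
          let st := v.toList.foldl scanStep (out, []);
          if st.2.isEmpty then st.1 else st.1 ++ [String.ofList st.2])
          = fun (out : List String) v => out ++ tokS v := by
        funext out v
        simp only
        rw [scan_foldl_spec v.toList out [], toks_nil_eq_tokS]
      rw [hstep]
      have hA : vs.foldl (fun out v =>
          out ++ (((PySem.Str.split? (PySem.Str.replace v "," " ") " ").getD []).filter
                    (fun p => p != ""))) []
          = vs.flatMap tokS := by
        have := foldl_tokS vs []
        simpa [tokS] using this
      rw [hA, foldl_tokS]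
      simp
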